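-- pv_equiv track=rewrite | github.com/radesh20/pi-mining | backend/app/services/chat_service.py | _pick_agent
-- ===== SOURCE A (Python) =====
-- from typing import Any, Dict, List, Optional, Tuple
--
-- def _pick_agent(message: str, vendor_id: Optional[str], case_id: Optional[str]) -> str:
--     q = message.lower()
--     if vendor_id:
--         return "Vendor Intelligence Agent"
--     if case_id:
--         return "Invoice Processing Agent"
--     if any(x in q for x in ["exception", "error", "block", "stuck", "issue", "overdue", "due date"]):
--         return "Exception Detection Agent"
--     if any(x in q for x in ["vendor", "supplier", "lifnr"]):
--         return "Vendor Intelligence Agent"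
--     if any(x in q for x in ["conform", "violation", "rule", "breach", "compliance"]):
--         return "Conformance Checker Agent"
--     if any(x in q for x in ["bottleneck", "delay", "slow", "cycle", "time", "duration", "wait"]):
--         return "Process Insight Agent"
--     if any(x in q for x in ["recommend", "next", "action", "what should", "suggest", "how to fix"]):
--         return "Case Resolution Agent"
--     return "Process Intelligence Agent"
-- ===== SOURCE B (Python) =====
-- # B: instead of A's staged first-match over ordered keyword groups, flatten all
-- # keywords into one keyword -> rule-index map (listed alphabetically; iteration
-- # order is irrelevant because we take a MINIMUM) and return the agent of the
-- # smallest matched rule index (5 = default).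
-- _KEYWORD_RULE = {
--     "action": 4, "block": 0, "bottleneck": 3, "breach": 2, "compliance": 2,
--     "conform": 2, "cycle": 3, "delay": 3, "due date": 0, "duration": 3,
--     "error": 0, "exception": 0, "how to fix": 4, "issue": 0, "lifnr": 1,
--     "next": 4, "overdue": 0, "recommend": 4, "rule": 2, "slow": 3,
--     "stuck": 0, "suggest": 4, "supplier": 1, "time": 3, "vendor": 1,
--     "violation": 2, "wait": 3, "what should": 4,
-- }
-- _AGENTS = [
--     "Exception Detection Agent", "Vendor Intelligence Agent",
--     "Conformance Checker Agent", "Process Insight Agent",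
--     "Case Resolution Agent", "Process Intelligence Agent",
-- ]
--
-- def _pick_agent(message, vendor_id, case_id):
--     if vendor_id:
--         return "Vendor Intelligence Agent"
--     if case_id:
--         return "Invoice Processing Agent"
--     q = message.lower()
--     best = min((r for k, r in _KEYWORD_RULE.items() if k in q), default=5)
--     return _AGENTS[best]
-- ===== Notes on version B (the rewrite author's own statement) =====
-- stated objective: alternative
-- what changed: Replaces A's staged first-match over five ordered keyword groups by an order-independent reduction: all keywords are flattened into one keyword-to-rule-index map traversed in alphabetical order, and the agent of the MINIMUM matched rule index is returned (proved correct because min over the flat map equals the first matching group); the two truthiness guards stay.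
import Mathlib
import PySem

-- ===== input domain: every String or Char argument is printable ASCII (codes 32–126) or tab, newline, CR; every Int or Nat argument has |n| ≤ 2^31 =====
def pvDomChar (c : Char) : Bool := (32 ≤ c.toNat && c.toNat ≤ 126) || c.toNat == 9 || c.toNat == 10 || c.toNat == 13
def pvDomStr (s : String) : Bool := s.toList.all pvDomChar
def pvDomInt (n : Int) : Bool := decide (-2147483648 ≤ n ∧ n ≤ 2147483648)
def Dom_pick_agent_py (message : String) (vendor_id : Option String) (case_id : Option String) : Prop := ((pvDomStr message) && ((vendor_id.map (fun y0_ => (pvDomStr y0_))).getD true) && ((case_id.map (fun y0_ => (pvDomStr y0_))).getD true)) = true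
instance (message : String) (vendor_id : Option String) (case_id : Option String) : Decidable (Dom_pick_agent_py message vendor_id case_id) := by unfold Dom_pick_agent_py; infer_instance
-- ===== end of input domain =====

-- B replaces A's staged first-match over ordered keyword groups by a single
-- order-independent reduction: a flat keyword -> rule-index map traversed in
-- alphabetical order, taking the MINIMUM matched index (objective: alternative).

-- ===== PORT A =====
-- literal transliteration of A's if-chain ('if vendor_id:' is Python truthiness: some non-empty string)
def pick_agent_py (message : String) (vendor_id : Option String) (case_id : Option String) : String :=
  let q := PySem.Str.lower message
  if vendor_id.getD "" ≠ "" then "Vendor Intelligence Agent"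
  else if case_id.getD "" ≠ "" then "Invoice Processing Agent"
  else if (["exception", "error", "block", "stuck", "issue", "overdue", "due date"].any
      (fun x => PySem.Str.isIn x q)) then "Exception Detection Agent"
  else if (["vendor", "supplier", "lifnr"].any (fun x => PySem.Str.isIn x q)) then
    "Vendor Intelligence Agent"
  else if (["conform", "violation", "rule", "breach", "compliance"].any
      (fun x => PySem.Str.isIn x q)) then "Conformance Checker Agent"
  else if (["bottleneck", "delay", "slow", "cycle", "time", "duration", "wait"].any
      (fun x => PySem.Str.isIn x q)) then "Process Insight Agent"
  else if (["recommend", "next", "action", "what should", "suggest", "how to fix"].any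
      (fun x => PySem.Str.isIn x q)) then "Case Resolution Agent"
  else "Process Intelligence Agent"

-- ===== PORT B =====
-- the flat keyword -> rule-index map from Source B, in alphabetical order
def pvKeywordRule : List (String × Nat) :=
  [ ("action", 4), ("block", 0), ("bottleneck", 3), ("breach", 2), ("compliance", 2),
    ("conform", 2), ("cycle", 3), ("delay", 3), ("due date", 0), ("duration", 3),
    ("error", 0), ("exception", 0), ("how to fix", 4), ("issue", 0), ("lifnr", 1),
    ("next", 4), ("overdue", 0), ("recommend", 4), ("rule", 2), ("slow", 3),
    ("stuck", 0), ("suggest", 4), ("supplier", 1), ("time", 3), ("vendor", 1),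
    ("violation", 2), ("wait", 3), ("what should", 4) ]

def pvAgents : List String :=
  [ "Exception Detection Agent", "Vendor Intelligence Agent",
    "Conformance Checker Agent", "Process Insight Agent",
    "Case Resolution Agent", "Process Intelligence Agent" ]

def pick_agent_py_alt (message : String) (vendor_id : Option String) (case_id : Option String) : String :=
  if vendor_id.getD "" ≠ "" then "Vendor Intelligence Agent"
  else if case_id.getD "" ≠ "" then "Invoice Processing Agent"
  else
    let q := PySem.Str.lower message
    let best := pvKeywordRule.foldl
      (fun b kr => if PySem.Str.isIn kr.1 q then min b kr.2 else b) 5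
    pvAgents.getD best ""

-- ===== PRECONDITION & SPEC =====
def Spec_pick_agent_py (message : String) (vendor_id : Option String) (case_id : Option String) (out : String) : Prop := out = pick_agent_py_alt message vendor_id case_id
instance (message : String) (vendor_id : Option String) (case_id : Option String) (out : String) : Decidable (Spec_pick_agent_py message vendor_id case_id out) := by unfold Spec_pick_agent_py; infer_instance

-- ===== CLAIM (what is proved, stated in full; the proofs are below) =====
def Claim_equal_pick_agent_py : Prop := ∀ (message : String) (vendor_id : Option String) (case_id : Option String), Dom_pick_agent_py message vendor_id case_id → Spec_pick_agent_py message vendor_id case_id (pick_agent_py message vendor_id case_id)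

-- ===== LEMMAS AND PROOFS =====

-- the step function of B's min-fold, abbreviated for the lemmas
def pvStep (q : String) : Nat → String × Nat → Nat :=
  fun b kr => if PySem.Str.isIn kr.1 q then min b kr.2 else b

theorem pvStep_rcomm (q : String) (b : Nat) (x y : String × Nat) :
    pvStep q (pvStep q b x) y = pvStep q (pvStep q b y) x := by
  unfold pvStep
  split_ifs <;> omega

-- B's list reordered group-by-group into A's rule order
def pvGrouped : List (String × Nat) :=
  (["exception", "error", "block", "stuck", "issue", "overdue", "due date"].map (fun k => (k, 0)))
  ++ (["vendor", "supplier", "lifnr"].map (fun k => (k, 1)))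
  ++ (["conform", "violation", "rule", "breach", "compliance"].map (fun k => (k, 2)))
  ++ (["bottleneck", "delay", "slow", "cycle", "time", "duration", "wait"].map (fun k => (k, 3)))
  ++ (["recommend", "next", "action", "what should", "suggest", "how to fix"].map (fun k => (k, 4)))

theorem pvPerm : pvKeywordRule.Perm pvGrouped := by decide

-- folding one group (all keywords carry the same rule index i)
theorem pvFold_group (q : String) (ks : List String) (i a : Nat) :
    (ks.map (fun k => (k, i))).foldl (pvStep q) a
      = if ks.any (fun k => PySem.Str.isIn k q) then min a i else a := by
  induction ks generalizing a with
  | nil => simp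
  | cons k ks ih =>
    simp only [List.map_cons, List.foldl_cons, List.any_cons, pvStep]
    by_cases h : PySem.Str.isIn k q = true
    · simp only [h, if_pos, Bool.true_or, ih]
      split_ifs <;> omega
    · rw [if_neg h, ih]
      simp only [h, Bool.false_or]

theorem pvFold_eq (q : String) :
    pvKeywordRule.foldl (pvStep q) 5 = pvGrouped.foldl (pvStep q) 5 :=
  @List.Perm.foldl_eq _ _ (pvStep q) _ _ ⟨pvStep_rcomm q⟩ pvPerm 5

-- B's min-fold written as the chain of A's five group tests
theorem pvFold_chain (q : String) :
    pvKeywordRule.foldl (pvStep q) 5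
      = if (["exception", "error", "block", "stuck", "issue", "overdue", "due date"].any
            (fun x => PySem.Str.isIn x q)) then 0
        else if (["vendor", "supplier", "lifnr"].any (fun x => PySem.Str.isIn x q)) then 1
        else if (["conform", "violation", "rule", "breach", "compliance"].any
            (fun x => PySem.Str.isIn x q)) then 2
        else if (["bottleneck", "delay", "slow", "cycle", "time", "duration", "wait"].any
            (fun x => PySem.Str.isIn x q)) then 3
        else if (["recommend", "next", "action", "what should", "suggest", "how to fix"].any
            (fun x => PySem.Str.isIn x q)) then 4
        else 5 := by
  rw [pvFold_eq]
  unfold pvGrouped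
  rw [List.foldl_append, List.foldl_append, List.foldl_append, List.foldl_append]
  rw [pvFold_group, pvFold_group, pvFold_group, pvFold_group, pvFold_group]
  split_ifs <;> rfl

-- ===== VERDICT (by name: the statement is the Claim_ definition above) =====
theorem pick_agent_py_spec : Claim_equal_pick_agent_py := by
  intro message vendor_id case_id _
  unfold Spec_pick_agent_py pick_agent_py pick_agent_py_alt
  by_cases hv : vendor_id.getD "" ≠ ""
  · rw [if_pos hv, if_pos hv]
  rw [if_neg hv, if_neg hv]
  by_cases hc : case_id.getD "" ≠ ""
  · rw [if_pos hc, if_pos hc]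
  rw [if_neg hc, if_neg hc]
  have h := pvFold_chain (PySem.Str.lower message)
  show _ = pvAgents.getD (pvKeywordRule.foldl (pvStep (PySem.Str.lower message)) 5) ""
  rw [h]
  split_ifs <;> rfl
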